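-- pv_equiv track=rewrite | github.com/brcolli/StockTools | src/BotometerRequests.py | replace_missed
-- ===== SOURCE A (Python) =====
-- def replace_missed(expected, result_indices, results, null_result=-1):
--     """
--     @TODO review for deletion
--     Inserts some null value into a list of data at spots where result_indices do not line up with expected.
--
--     :param expected: list of expected ids
--     :type expected: list
--
--     :param result_indices: list of resulting ids
--     :type result_indices: list
--
--     :param results: list of results with same indices as result_indices
--     :type results: list
--
--     :param null_result: null value to insert instead of missing data
--     :type null_result: any
--
--     :return: data with nulls inserted for missing values
--     :rtype: list
--     """
--     if len(expected) == len(result_indices):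
--         return results
--     for i in range(len(expected)):
--         if result_indices[i] != expected[i]:
--             result_indices.insert(i, expected[i])
--             results.insert(i, null_result)
--
--     return results
-- ===== SOURCE B (Python) =====
-- def replace_missed(expected, result_indices, results, null_result=-1):
--     if len(expected) == len(result_indices):
--         return results
--     n = len(result_indices)
--     out = []
--     j = 0  # pointer into result_indices
--     k = 0  # pointer into results
--     for e in expected:
--         if j < n and result_indices[j] == e:
--             j += 1
--             if k < len(results):
--                 out.append(results[k])
--                 k += 1
--         else:
--             out.append(null_result)
--     return out + results[k:]
-- ===== Notes on version B (the rewrite author's own statement) =====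
-- stated objective: alternative
-- what changed: Replaces A's index loop that repeatedly calls list.insert on the (mutated) result_indices/results lists by a single-pass two-pointer merge over the original lists that builds a fresh output list; B does not mutate its arguments.
-- crash fix: When the lengths differ and result_indices is a subsequence of expected without its last element, A consumes all of result_indices before the loop ends and raises IndexError; B returns expected aligned with results, nulls filled in for the missing ids. — e.g. on replace_missed([1, 2], [1], [10], -1): A raises IndexError, B returns [10, -1]
import Mathlib
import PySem

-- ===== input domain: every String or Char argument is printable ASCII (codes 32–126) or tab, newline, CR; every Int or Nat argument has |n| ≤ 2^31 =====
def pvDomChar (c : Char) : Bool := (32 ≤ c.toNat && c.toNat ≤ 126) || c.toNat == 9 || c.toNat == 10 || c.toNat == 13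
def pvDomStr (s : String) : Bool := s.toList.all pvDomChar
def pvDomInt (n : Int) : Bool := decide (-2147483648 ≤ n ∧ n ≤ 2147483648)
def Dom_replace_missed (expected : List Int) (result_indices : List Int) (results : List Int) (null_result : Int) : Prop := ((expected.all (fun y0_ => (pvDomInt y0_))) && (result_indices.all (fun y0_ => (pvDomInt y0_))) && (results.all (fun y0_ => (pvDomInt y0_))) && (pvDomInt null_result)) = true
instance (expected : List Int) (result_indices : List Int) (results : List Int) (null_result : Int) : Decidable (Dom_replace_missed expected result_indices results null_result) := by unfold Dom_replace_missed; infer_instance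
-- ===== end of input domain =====

-- B replaces A's insert-into-list loop by a single-pass two-pointer merge that builds a fresh
-- output list (equal RETURN value; A additionally mutates result_indices/results in place,
-- B does not — the claim is about the return value only).

-- ===== PORT A =====
-- A's loop 'for i in range(len(expected))', recursing on the number of remaining iterations
-- (first Nat argument), with i the current index; result_indices/results are the mutating lists.
-- 'result_indices[i]' is PySem.List.pyGet?; 'none' is Python's IndexError (excluded by Pre_),
-- there the port returns [] as an arbitrary value.  'expected[i]' always has 0 ≤ i < len, so
-- pyGetD with default 0 is exact.
def replaceLoopA (expected : List Int) (null_result : Int) :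
    Nat → Nat → List Int → List Int → List Int
  | 0, _, _, res => res
  | n + 1, i, ri, res =>
    match PySem.List.pyGet? ri (i : Int) with
    | none => []  -- IndexError in Python (outside Pre_)
    | some v =>
      if v ≠ PySem.List.pyGetD expected (i : Int) 0 then
        replaceLoopA expected null_result n (i + 1)
          (PySem.List.insert ri (i : Int) (PySem.List.pyGetD expected (i : Int) 0))
          (PySem.List.insert res (i : Int) null_result)
      else
        replaceLoopA expected null_result n (i + 1) ri res

def replace_missed (expected : List Int) (result_indices : List Int) (results : List Int) (null_result : Int) : List Int :=
  if expected.length = result_indices.length then results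
  else replaceLoopA expected null_result expected.length 0 result_indices results

-- ===== PORT B =====
-- Source B's 'for e in expected' loop with pointers j (into result_indices) and k (into results);
-- the appends to 'out' become the cons cells of the result; 'results[k:]' is the final slice.
-- 'results[k]' is read only under the guard k < len(results), so pyGetD is exact there.
def mergeLoopB (ri results : List Int) (n : Nat) (null_result : Int) :
    List Int → Nat → Nat → List Int
  | [], _, k => PySem.List.slice results (some (k : Int)) none   -- out + results[k:]
  | e :: es, j, k =>
    if j < n ∧ PySem.List.pyGet? ri (j : Int) = some e then
      if k < results.length then
        PySem.List.pyGetD results (k : Int) null_result :: mergeLoopB ri results n null_result es (j + 1) (k + 1)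
      else
        mergeLoopB ri results n null_result es (j + 1) k
    else
      null_result :: mergeLoopB ri results n null_result es j k

def replace_missed_alt (expected : List Int) (result_indices : List Int) (results : List Int) (null_result : Int) : List Int :=
  if expected.length = result_indices.length then results
  else mergeLoopB result_indices results result_indices.length null_result expected 0 0

-- ===== PRECONDITION & SPEC =====
-- Pre_ excludes exactly the inputs where A raises IndexError: lengths unequal while
-- result_indices is a subsequence of expected minus its last element (the loop then consumes
-- all of result_indices before i reaches the end and result_indices[i] goes out of range).
def Pre_replace_missed (expected : List Int) (result_indices : List Int) (results : List Int) (null_result : Int) : Prop :=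
  expected.length = result_indices.length ∨
    ¬ List.Sublist result_indices (expected.take (expected.length - 1))

instance (expected : List Int) (result_indices : List Int) (results : List Int) (null_result : Int) : Decidable (Pre_replace_missed expected result_indices results null_result) := by
  unfold Pre_replace_missed; infer_instance

def pvWitness_replace_missed : List Int × List Int × List Int × Int := ([1, 2], [2], [5], -1)

-- On inputs where result_indices is a subsequence of expected minus its last element and the
-- lengths differ, A raises IndexError while B returns the expected list aligned with nulls.
def Raises_replace_missed (expected : List Int) (result_indices : List Int) (results : List Int) (null_result : Int) : Prop :=
  expected.length ≠ result_indices.length ∧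
    List.Sublist result_indices (expected.take (expected.length - 1))

instance (expected : List Int) (result_indices : List Int) (results : List Int) (null_result : Int) : Decidable (Raises_replace_missed expected result_indices results null_result) := by
  unfold Raises_replace_missed; infer_instance

def pvRaiseWitness_replace_missed : List Int × List Int × List Int × Int := ([1, 2], [1], [10], -1)
def pvRaiseWitnessOut_replace_missed : List Int := [10, -1]

def Spec_replace_missed (expected : List Int) (result_indices : List Int) (results : List Int) (null_result : Int) (out : List Int) : Prop := out = replace_missed_alt expected result_indices results null_result
instance (expected : List Int) (result_indices : List Int) (results : List Int) (null_result : Int) (out : List Int) : Decidable (Spec_replace_missed expected result_indices results null_result out) := by unfold Spec_replace_missed; infer_instance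

-- ===== CLAIM (what is proved, stated in full; the proofs are below) =====
def Claim_equal_replace_missed : Prop := ∀ (expected : List Int) (result_indices : List Int) (results : List Int) (null_result : Int), Dom_replace_missed expected result_indices results null_result → Pre_replace_missed expected result_indices results null_result → Spec_replace_missed expected result_indices results null_result (replace_missed expected result_indices results null_result)

def Claim_raises_replace_missed : Prop := (∀ (expected : List Int) (result_indices : List Int) (results : List Int) (null_result : Int), Dom_replace_missed expected result_indices results null_result → Raises_replace_missed expected result_indices results null_result → ¬ Pre_replace_missed expected result_indices results null_result) ∧ (Dom_replace_missed (pvRaiseWitness_replace_missed.1) (pvRaiseWitness_replace_missed.2.1) (pvRaiseWitness_replace_missed.2.2.1) (pvRaiseWitness_replace_missed.2.2.2) ∧ Raises_replace_missed (pvRaiseWitness_replace_missed.1) (pvRaiseWitness_replace_missed.2.1) (pvRaiseWitness_replace_missed.2.2.1) (pvRaiseWitness_replace_missed.2.2.2) ∧ replace_missed_alt (pvRaiseWitness_replace_missed.1) (pvRaiseWitness_replace_missed.2.1) (pvRaiseWitness_replace_missed.2.2.1) (pvRaiseWitness_replace_missed.2.2.2) = pvRaiseWitnessOut_replace_missed)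

-- ===== LEMMAS AND PROOFS =====

-- Reference merge on list suffixes: es = remaining expected, r = remaining original
-- result_indices, s = remaining original results.
def mergeS (null_result : Int) : List Int → List Int → List Int → List Int
  | [], _, s => s
  | _ :: es, [], s => null_result :: mergeS null_result es [] s
  | e :: es, r0 :: r', s =>
    if r0 = e then
      match s with
      | [] => mergeS null_result es r' []
      | s0 :: s' => s0 :: mergeS null_result es r' s'
    else
      null_result :: mergeS null_result es (r0 :: r') s

-- Python insert at a nonnegative in-range-or-clamped index.
theorem pyInsert_nat (l : List Int) (n : Nat) (v : Int) :
    PySem.List.insert l (n : Int) v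
      = l.take (min n l.length) ++ v :: l.drop (min n l.length) := by
  simp only [PySem.List.insert, PySem.List.sliceIndices]
  have h0 : ¬ ((1 : Int) < 0) := by omega
  simp only [if_neg h0]
  have h1 : ¬ ((n : Int) < 0) := by omega
  simp only [if_neg h1]
  have : (min (n : Int) (l.length : Int)).toNat = min n l.length := by omega
  rw [this]

theorem pyInsert_append_eq (P s : List Int) (v : Int) (i : Nat)
    (h : P.length = i ∨ (s = [] ∧ P.length ≤ i)) :
    PySem.List.insert (P ++ s) (i : Int) v = P ++ v :: s := by
  rcases h with h | ⟨hs, hle⟩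
  · have hmin : min i (P ++ s).length = P.length := by
      simp [List.length_append]; omega
    rw [pyInsert_nat, hmin, List.take_left, List.drop_left]
  · subst hs
    have hmin : min i (P ++ ([] : List Int)).length = P.length := by
      simp; omega
    rw [pyInsert_nat, hmin]
    simp

-- pyGetD on expected at the boundary of the processed prefix.
theorem pyGetD_append_length (P : List Int) (e : Int) (t : List Int) :
    PySem.List.pyGetD (P ++ e :: t) ((P.length : Nat) : Int) 0 = e := by
  rw [PySem.List.pyGetD_natCast]
  simp [List.getD_eq_getElem?_getD]

theorem take_len_cons (a : Int) (l : List Int) (h : l ≠ []) :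
    (a :: l).take l.length = a :: l.take (l.length - 1) := by
  rcases l with _ | ⟨b, t⟩
  · simp at h
  · simp [List.take_succ_cons]

theorem drop_cons_of_head (l t : List Int) (x : Int) (j : Nat) (h : l.drop j = x :: t) :
    t = l.drop (j + 1) := by
  have h2 : (l.drop j).tail = l.drop (j + 1) := List.tail_drop
  rw [h] at h2
  simpa using h2

-- A-side invariant: after i = P.length steps the mutated lists are P ++ r and Q ++ s, where P
-- is the processed prefix of expected (which A has forced result_indices to copy), r and s are
-- the unconsumed suffixes of the original inputs, and Q is the output built so far.
theorem replaceLoopA_eq (null_result : Int) :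
    ∀ (es r s P Q : List Int),
      Q.length ≤ P.length → (s ≠ [] → Q.length = P.length) →
      (es = [] ∨ ¬ List.Sublist r (es.take (es.length - 1))) →
      replaceLoopA (P ++ es) null_result es.length P.length (P ++ r) (Q ++ s)
        = Q ++ mergeS null_result es r s := by
  intro es
  induction es with
  | nil => intro r s P Q _ _ _; simp [replaceLoopA, mergeS]
  | cons e es' ih =>
    intro r s P Q hQle hQeq hsub
    rcases hsub with h | hsub
    · exact absurd h (by simp)
    match r with
    | [] => exact absurd (List.nil_sublist _) hsub
    | r0 :: r' =>
      have hget : PySem.List.pyGet? (P ++ r0 :: r') ((P.length : Nat) : Int) = some r0 :=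
        PySem.List.pyGet?_append_length P r' r0
      have hexp : PySem.List.pyGetD (P ++ e :: es') ((P.length : Nat) : Int) 0 = e :=
        pyGetD_append_length P e es'
      show replaceLoopA (P ++ e :: es') null_result (es'.length + 1) P.length
            (P ++ r0 :: r') (Q ++ s) = Q ++ mergeS null_result (e :: es') (r0 :: r') s
      rw [replaceLoopA, hget, hexp]
      by_cases hre : r0 = e
      · -- match: element consumed, no insertion
        subst hre
        simp only [ne_eq, not_true_eq_false, if_neg, not_false_eq_true]
        have hassocE : P ++ r0 :: es' = (P ++ [r0]) ++ es' := by simp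
        have hassocR : P ++ r0 :: r' = (P ++ [r0]) ++ r' := by simp
        have hsub' : es' = [] ∨ ¬ List.Sublist r' (es'.take (es'.length - 1)) := by
          by_cases hes : es' = []
          · exact Or.inl hes
          · refine Or.inr fun hc => hsub ?_
            show List.Sublist (r0 :: r') ((r0 :: es').take ((r0 :: es').length - 1))
            have hlen1 : (r0 :: es').length - 1 = es'.length := by simp
            rw [hlen1, take_len_cons r0 es' hes]
            exact List.Sublist.cons₂ r0 hc
        match s with
        | [] =>
          have h1 : replaceLoopA (P ++ r0 :: es') null_result es'.length (P.length + 1)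
                (P ++ r0 :: r') (Q ++ []) = Q ++ mergeS null_result es' r' [] := by
            rw [hassocE, hassocR]
            have : P.length + 1 = (P ++ [r0]).length := by simp
            rw [this]
            exact ih r' [] (P ++ [r0]) Q (by simp; omega) (by simp) hsub'
          simpa [mergeS] using h1
        | s0 :: s' =>
          have hQP : Q.length = P.length := hQeq (by simp)
          have h1 : replaceLoopA (P ++ r0 :: es') null_result es'.length (P.length + 1)
                (P ++ r0 :: r') ((Q ++ [s0]) ++ s') = (Q ++ [s0]) ++ mergeS null_result es' r' s' := by
            rw [hassocE, hassocR]
            have : P.length + 1 = (P ++ [r0]).length := by simp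
            rw [this]
            exact ih r' s' (P ++ [r0]) (Q ++ [s0]) (by simp [hQP]) (by simp [hQP]) hsub'
          have : Q ++ s0 :: s' = (Q ++ [s0]) ++ s' := by simp
          rw [this, h1]
          simp [mergeS]
      · -- mismatch: insert expected[i] / null at position i
        simp only [ne_eq, hre, not_false_eq_true, if_pos]
        have hinsR : PySem.List.insert (P ++ r0 :: r') ((P.length : Nat) : Int) e
            = P ++ e :: r0 :: r' := pyInsert_append_eq P (r0 :: r') e P.length (Or.inl rfl)
        have hinsS : PySem.List.insert (Q ++ s) ((P.length : Nat) : Int) null_result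
            = Q ++ null_result :: s := by
          match s with
          | [] => exact pyInsert_append_eq Q [] null_result P.length (Or.inr ⟨rfl, hQle⟩)
          | s0 :: s' => exact pyInsert_append_eq Q (s0 :: s') null_result P.length (Or.inl (hQeq (by simp)))
        rw [hinsR, hinsS]
        have hassocE : P ++ e :: es' = (P ++ [e]) ++ es' := by simp
        have hassocR : P ++ e :: r0 :: r' = (P ++ [e]) ++ (r0 :: r') := by simp
        have hassocQ : Q ++ null_result :: s = (Q ++ [null_result]) ++ s := by simp
        have hsub' : es' = [] ∨ ¬ List.Sublist (r0 :: r') (es'.take (es'.length - 1)) := by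
          by_cases hes : es' = []
          · exact Or.inl hes
          · refine Or.inr fun hc => hsub ?_
            show List.Sublist (r0 :: r') ((e :: es').take ((e :: es').length - 1))
            have hlen1 : (e :: es').length - 1 = es'.length := by simp
            rw [hlen1, take_len_cons e es' hes]
            exact List.Sublist.cons e hc
        have h1 : replaceLoopA ((P ++ [e]) ++ es') null_result es'.length (P ++ [e]).length
              ((P ++ [e]) ++ (r0 :: r')) ((Q ++ [null_result]) ++ s)
            = (Q ++ [null_result]) ++ mergeS null_result es' (r0 :: r') s :=
          ih (r0 :: r') s (P ++ [e]) (Q ++ [null_result]) (by simp; omega)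
            (fun hs => by simp [hQeq hs]) hsub'
        have hlen : P.length + 1 = (P ++ [e]).length := by simp
        rw [hassocR, hassocQ, hassocE, hlen, h1]
        simp [mergeS, hre]

-- B-side: the two-pointer loop computes the suffix merge.
theorem mergeLoopB_eq (ri results : List Int) (null_result : Int) :
    ∀ (es : List Int) (j k : Nat),
      mergeLoopB ri results ri.length null_result es j k
        = mergeS null_result es (ri.drop j) (results.drop k) := by
  intro es
  induction es with
  | nil =>
    intro j k
    rw [mergeLoopB, PySem.List.slice_from_natCast]
    cases hd : ri.drop j <;> simp [mergeS]
  | cons e es' ih =>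
    intro j k
    rw [mergeLoopB]
    by_cases hc : j < ri.length ∧ PySem.List.pyGet? ri (j : Int) = some e
    · obtain ⟨hj, hg⟩ := hc
      rw [PySem.List.pyGet?_natCast] at hg
      have hd : ri.drop j = e :: ri.drop (j + 1) := by
        rw [← List.head?_drop] at hg
        rcases hdd : ri.drop j with _ | ⟨x, t⟩
        · simp [hdd] at hg
        · rw [hdd] at hg
          simp at hg
          subst hg
          congr 1
          exact drop_cons_of_head ri t x j hdd
      rw [if_pos ⟨hj, by rw [PySem.List.pyGet?_natCast]; exact hg⟩]
      by_cases hk : k < results.length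
      · have hds : results.drop k = results[k] :: results.drop (k + 1) := by
          rcases hdd : results.drop k with _ | ⟨x, t⟩
          · have := List.drop_eq_nil_iff.mp hdd; omega
          · have hx : some x = results[k]? := by
              rw [← List.head?_drop, hdd]; rfl
            rw [List.getElem?_eq_getElem hk] at hx
            have hxx : x = results[k] := by exact (Option.some.inj hx)
            subst hxx
            congr 1
            exact drop_cons_of_head results t results[k] k hdd
        rw [if_pos hk, ih (j + 1) (k + 1), hd, hds]
        simp [mergeS, PySem.List.pyGetD_natCast, List.getD_eq_getElem?_getD,
          List.getElem?_eq_getElem hk]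
      · have hds : results.drop k = [] := List.drop_eq_nil_iff.mpr (by omega)
        rw [if_neg hk, ih (j + 1) k, hd, hds]
        simp [mergeS]
    · rw [if_neg hc]
      rw [ih j k]
      rcases hdd : ri.drop j with _ | ⟨x, t⟩
      · simp [mergeS]
      · have hx : ri[j]? = some x := by rw [← List.head?_drop, hdd]; rfl
        have hj : j < ri.length := by
          by_contra h
          rw [List.getElem?_eq_none (by omega)] at hx; cases hx
        have hne : x ≠ e := by
          intro h; subst h
          exact hc ⟨hj, by rw [PySem.List.pyGet?_natCast]; exact hx⟩
        simp [mergeS, hne]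

-- ===== VERDICT (by name: the statement is the Claim_ definition above) =====
theorem replace_missed_spec : Claim_equal_replace_missed := by
  intro expected result_indices results null_result _ hpre
  unfold Spec_replace_missed replace_missed replace_missed_alt
  by_cases hlen : expected.length = result_indices.length
  · simp [hlen]
  · rw [if_neg hlen, if_neg hlen]
    have hsub : expected = [] ∨
        ¬ List.Sublist result_indices (expected.take (expected.length - 1)) := by
      rcases hpre with h | h
      · exact absurd h hlen
      · exact Or.inr h
    have hA := replaceLoopA_eq null_result expected result_indices results [] []
      (by simp) (by simp) hsub
    have hB := mergeLoopB_eq result_indices results null_result expected 0 0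
    simpa using hA.trans (by simpa using hB.symm)

@[simp] theorem replace_missed_raises : Claim_raises_replace_missed := by
  unfold Claim_raises_replace_missed
  constructor
  · intro expected result_indices results null_result _ hr hpre
    rcases hpre with h | h
    · exact hr.1 h
    · exact h hr.2
  · exact ⟨by decide, by decide, by decide⟩
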